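-- pv_equiv track=rewrite | github.com/yskang/AlgorithmPractice | baekjoon/python/why_cherry_blossoms_bloom_on_information_islands_17127.py | get_rest_sum_of_list
-- ===== SOURCE A (Python) =====
-- from functools import reduce
-- from operator import mul, add
--
-- def get_rest_sum_of_list(ns: list, depth: int):
--     if depth == 2:
--         temp = []
--         for i in range(1, len(ns)):
--             temp.append(reduce(mul, ns[:i]) + reduce(mul, ns[i:]))
--         return temp
--
--     rests = []
--     for i in range(1, len(ns)):
--         rests += list(map(lambda x: x+reduce(mul, ns[:i]), get_rest_sum_of_list(ns[i:], depth+1)))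
--
--     return rests
-- ===== SOURCE B (Python) =====
-- def get_rest_sum_of_list(ns: list, depth: int):
--     if depth == 2:
--         n = len(ns)
--         suf = [0] * n
--         acc = 1
--         for j in range(n - 1, -1, -1):
--             acc *= ns[j]
--             suf[j] = acc
--         out = []
--         pre = 1
--         for i in range(1, n):
--             pre *= ns[i - 1]
--             out.append(pre + suf[i])
--         return out
--     out = []
--     pre = 1
--     for i in range(1, len(ns)):
--         pre *= ns[i - 1]
--         for x in get_rest_sum_of_list(ns[i:], depth + 1):
--             out.append(x + pre)
--     return out
-- ===== Notes on version B (the rewrite author's own statement) =====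
-- stated objective: alternative
-- what changed: Replaces the per-iteration reduce(mul, ...) rescans by a running prefix product and a once-built suffix-product array at the base level (linear instead of quadratic work per recursion level; intended as faster, measured 1.93x at n=16, but the exponential output size dominates at large n so a timing run could not confirm it)
import Mathlib
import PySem

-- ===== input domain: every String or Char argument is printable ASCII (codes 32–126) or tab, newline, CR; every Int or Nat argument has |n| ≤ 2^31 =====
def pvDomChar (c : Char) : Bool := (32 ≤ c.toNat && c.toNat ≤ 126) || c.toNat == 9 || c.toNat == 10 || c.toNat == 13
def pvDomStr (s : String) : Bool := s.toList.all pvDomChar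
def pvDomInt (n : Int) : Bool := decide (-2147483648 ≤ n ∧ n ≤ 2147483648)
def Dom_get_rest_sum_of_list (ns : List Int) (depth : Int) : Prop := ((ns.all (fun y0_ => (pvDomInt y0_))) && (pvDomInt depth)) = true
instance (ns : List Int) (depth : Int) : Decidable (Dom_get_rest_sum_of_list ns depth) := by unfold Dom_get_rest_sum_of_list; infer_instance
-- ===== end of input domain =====

-- B replaces A's repeated reduce(mul, ns[:i]) / reduce(mul, ns[i:]) rescans by a running
-- prefix product and a once-built suffix-product list (same return value, different traversal).

-- ===== PORT A =====
-- Python's reduce(mul, l): first element as seed, fold mul over the rest ([] unreachable in A).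
def reduceMulA : List Int → Int
  | [] => 0
  | h :: t => t.foldl (· * ·) h

-- the depth == 2 loop of A: for i in range(1, len(ns)): temp.append(reduce(mul,ns[:i]) + reduce(mul,ns[i:]))
def aBaseLoop (ns : List Int) (i : Nat) : List Int :=
  if _h : i < ns.length then
    (reduceMulA (ns.take i) + reduceMulA (ns.drop i)) :: aBaseLoop ns (i + 1)
  else []
termination_by ns.length - i

mutual
  -- literal port of A; the loops are index recursions over the same i and the same slices
  def get_rest_sum_of_list (ns : List Int) (depth : Int) : List Int :=
    if depth = 2 then aBaseLoop ns 1
    else aRecLoop ns depth 1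
  termination_by (ns.length, 1, 0)
  decreasing_by
    exact Prod.Lex.right _ (Prod.Lex.left _ _ (by omega))

  -- the recursive loop of A: rests += map(lambda x: x + reduce(mul, ns[:i]), rec(ns[i:], depth+1))
  -- (the 1 ≤ i bound holds at every call site; it is stated in the guard only for termination)
  def aRecLoop (ns : List Int) (depth : Int) (i : Nat) : List Int :=
    if _h : 1 ≤ i ∧ i < ns.length then
      ((get_rest_sum_of_list (ns.drop i) (depth + 1)).map (fun x => x + reduceMulA (ns.take i)))
        ++ aRecLoop ns depth (i + 1)
    else []
  termination_by (ns.length, 0, ns.length - i)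
  decreasing_by
    · exact Prod.Lex.left _ _ (by simp; omega)
    · exact Prod.Lex.right _ (Prod.Lex.right _ (by omega))
end

-- ===== PORT B =====
-- the backwards suffix-product loop of Source B (suf[j] = ns[j] * suf[j+1])
def sufProds : List Int → List Int
  | [] => []
  | x :: t =>
    match sufProds t with
    | [] => [x]
    | h :: hs => (x * h) :: h :: hs

-- the depth == 2 loop of Source B: walk ns with running prefix product, consuming suf[1:]
def bBaseLoop (pre : Int) : List Int → List Int → List Int
  | x :: xs, s :: ss => (pre * x + s) :: bBaseLoop (pre * x) xs ss
  | _, _ => []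

mutual
  -- literal port of B (from Source B)
  def get_rest_sum_of_list_alt (ns : List Int) (depth : Int) : List Int :=
    if depth = 2 then bBaseLoop 1 ns ((sufProds ns).drop 1)
    else bRecLoop 1 ns depth
  termination_by (ns.length, 1)
  decreasing_by
    exact Prod.Lex.right _ (by omega)

  -- the recursive loop of Source B: pre *= ns[i-1]; extend with map (+pre) of the recursive call on ns[i:]
  def bRecLoop (pre : Int) (cur : List Int) (depth : Int) : List Int :=
    match cur with
    | x :: y :: rest =>
      ((get_rest_sum_of_list_alt (y :: rest) (depth + 1)).map (fun v => v + pre * x))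
        ++ bRecLoop (pre * x) (y :: rest) depth
    | _ => []
  termination_by (cur.length, 0)
  decreasing_by
    · exact Prod.Lex.left _ _ (by simp)
    · exact Prod.Lex.left _ _ (by simp)
end

-- ===== PRECONDITION & SPEC =====
def Spec_get_rest_sum_of_list (ns : List Int) (depth : Int) (out : List Int) : Prop := out = get_rest_sum_of_list_alt ns depth
instance (ns : List Int) (depth : Int) (out : List Int) : Decidable (Spec_get_rest_sum_of_list ns depth out) := by unfold Spec_get_rest_sum_of_list; infer_instance

-- ===== CLAIM (what is proved, stated in full; the proofs are below) =====
def Claim_equal_get_rest_sum_of_list : Prop := ∀ (ns : List Int) (depth : Int), Dom_get_rest_sum_of_list ns depth → Spec_get_rest_sum_of_list ns depth (get_rest_sum_of_list ns depth)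

-- ===== LEMMAS AND PROOFS =====

lemma foldl_mul_eq (t : List Int) (x : Int) : t.foldl (· * ·) x = x * t.prod := by
  induction t generalizing x with
  | nil => simp
  | cons h t ih => simp [List.foldl, ih, mul_assoc]

lemma reduceMulA_eq_prod (l : List Int) (h : l ≠ []) : reduceMulA l = l.prod := by
  cases l with
  | nil => exact absurd rfl h
  | cons a t => simp [reduceMulA, foldl_mul_eq]

lemma sufProds_cons (x : Int) (t : List Int) : sufProds (x :: t) = (x :: t).prod :: sufProds t := by
  induction t generalizing x with
  | nil => simp [sufProds]
  | cons y u ih => rw [sufProds, ih y]; simp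


-- common shape of both depth == 2 loops (proof-only helper)
def fBase : Int → List Int → List Int
  | _, [] => []
  | pre, x :: t => if t.isEmpty then [] else (pre * x + t.prod) :: fBase (pre * x) t

lemma bBase_eq_fBase : ∀ (xs : List Int) (pre : Int),
    bBaseLoop pre xs ((sufProds xs).drop 1) = fBase pre xs := by
  intro xs
  induction xs with
  | nil => intro pre; simp [bBaseLoop, fBase]
  | cons x t ih =>
    intro pre
    rw [sufProds_cons]
    cases t with
    | nil => simp [bBaseLoop, sufProds, fBase]
    | cons y u =>
      rw [sufProds_cons, List.drop_one, List.tail_cons, fBase]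
      simp only [List.isEmpty_cons, if_false, Bool.false_eq_true]
      rw [bBaseLoop, ← ih (pre * x)]
      rw [sufProds_cons, List.drop_one, List.tail_cons]

lemma take_prod_succ (ns : List Int) (i : Nat) (h : i < ns.length) :
    (ns.take (i + 1)).prod = (ns.take i).prod * ns[i] := by
  exact List.prod_take_succ _ _ h

lemma drop_at_i (ns : List Int) (i : Nat) (hi : 1 ≤ i) (h : i - 1 < ns.length) :
    ns.drop (i - 1) = ns[i - 1] :: ns.drop i := by
  have := List.drop_eq_getElem_cons h
  rwa [show i - 1 + 1 = i by omega] at this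

lemma drop_len_small (ns : List Int) (i : Nat) (hi : 1 ≤ i) (h : ns.length ≤ i) :
    ns.drop (i - 1) = [] ∨ ∃ a, ns.drop (i - 1) = [a] := by
  cases hc : ns.drop (i - 1) with
  | nil => exact Or.inl rfl
  | cons a t =>
    right
    refine ⟨a, ?_⟩
    have hl := congrArg List.length hc
    rw [List.length_drop, List.length_cons] at hl
    have : t = [] := List.eq_nil_of_length_eq_zero (by omega)
    rw [this]

lemma drop_ne_nil_of_lt (ns : List Int) (i : Nat) (h : i < ns.length) : ns.drop i ≠ [] := by
  intro hc
  have := congrArg List.length hc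
  rw [List.length_drop, List.length_nil] at this
  omega

lemma take_ne_nil_of (ns : List Int) (i : Nat) (hi : 1 ≤ i) (h : i - 1 < ns.length) :
    ns.take i ≠ [] := by
  intro hc
  have := congrArg List.length hc
  rw [List.length_take, List.length_nil] at this
  omega

lemma aBase_eq_fBase (ns : List Int) : ∀ (k i : Nat), ns.length ≤ i + k → 1 ≤ i →
    aBaseLoop ns i = fBase (ns.take (i - 1)).prod (ns.drop (i - 1)) := by
  intro k
  induction k with
  | zero =>
    intro i hk hi
    rw [aBaseLoop, dif_neg (by omega)]
    rcases drop_len_small ns i hi (by omega) with hd | ⟨a, hd⟩ <;> simp [hd, fBase]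
  | succ k ih =>
    intro i hk hi
    by_cases h : i < ns.length
    · rw [aBaseLoop, dif_pos h]
      have h1 : i - 1 < ns.length := by omega
      have hdrop := drop_at_i ns i hi h1
      have hdropne := drop_ne_nil_of_lt ns i h
      have hie : (ns.drop i).isEmpty = false := by
        cases hc : ns.drop i with
        | nil => exact absurd hc hdropne
        | cons _ _ => simp
      have hip : i - 1 + 1 = i := by omega
      have hpre : (ns.take (i - 1)).prod * ns[i - 1] = (ns.take i).prod := by
        rw [← take_prod_succ ns (i - 1) h1, hip]
      rw [hdrop, fBase, hie]
      simp only [Bool.false_eq_true, if_false]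
      congr 1
      · rw [reduceMulA_eq_prod _ (take_ne_nil_of ns i hi h1),
            reduceMulA_eq_prod _ hdropne, hpre]
      · rw [ih (i + 1) (by omega) (by omega), show i + 1 - 1 = i by omega, hpre]
    · rw [aBaseLoop, dif_neg h]
      rcases drop_len_small ns i hi (by omega) with hd | ⟨a, hd⟩ <;> simp [hd, fBase]

lemma rec_loops_eq (ns : List Int) (depth : Int)
    (IH : ∀ m : List Int, m.length < ns.length → ∀ d : Int,
        get_rest_sum_of_list m d = get_rest_sum_of_list_alt m d) :
    ∀ (k i : Nat), ns.length ≤ i + k → 1 ≤ i →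
    aRecLoop ns depth i = bRecLoop (ns.take (i - 1)).prod (ns.drop (i - 1)) depth := by
  intro k
  induction k with
  | zero =>
    intro i hk hi
    rw [aRecLoop, dif_neg (by omega)]
    rcases drop_len_small ns i hi (by omega) with hd | ⟨a, hd⟩ <;> simp [hd, bRecLoop]
  | succ k ih =>
    intro i hk hi
    by_cases h : i < ns.length
    · rw [aRecLoop, dif_pos ⟨hi, h⟩]
      have h1 : i - 1 < ns.length := by omega
      have hdrop := drop_at_i ns i hi h1
      obtain ⟨y, rest, hyr⟩ : ∃ y rest, ns.drop i = y :: rest := by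
        cases hc : ns.drop i with
        | nil => exact absurd hc (drop_ne_nil_of_lt ns i h)
        | cons y rest => exact ⟨y, rest, rfl⟩
      have hpre : (ns.take (i - 1)).prod * ns[i - 1] = (ns.take i).prod := by
        have hip : i - 1 + 1 = i := by omega
        rw [← take_prod_succ ns (i - 1) h1, hip]
      rw [hdrop, hyr, bRecLoop, ← hyr]
      congr 1
      · rw [IH (ns.drop i) (by simp; omega) (depth + 1)]
        apply List.map_congr_left
        intro v _
        rw [reduceMulA_eq_prod _ (take_ne_nil_of ns i hi h1), hpre]
      · rw [ih (i + 1) (by omega) (by omega), show i + 1 - 1 = i by omega, hpre]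
    · rw [aRecLoop, dif_neg (by omega)]
      rcases drop_len_small ns i hi (by omega) with hd | ⟨a, hd⟩ <;> simp [hd, bRecLoop]

lemma main_eq : ∀ (ns : List Int) (depth : Int),
    get_rest_sum_of_list ns depth = get_rest_sum_of_list_alt ns depth := by
  intro ns
  induction hn : ns.length using Nat.strong_induction_on generalizing ns with
  | _ n IH =>
    subst hn
    intro depth
    rw [get_rest_sum_of_list, get_rest_sum_of_list_alt]
    by_cases h2 : depth = 2
    · rw [if_pos h2, if_pos h2]
      rw [aBase_eq_fBase ns ns.length 1 (by omega) (by omega)]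
      simp only [Nat.sub_self, List.take_zero, List.prod_nil, List.drop_zero]
      rw [bBase_eq_fBase]
    · rw [if_neg h2, if_neg h2]
      rw [rec_loops_eq ns depth (fun m hm d => IH m.length hm m rfl d) ns.length 1 (by omega) (by omega)]
      simp

-- ===== VERDICT (by name: the statement is the Claim_ definition above) =====
theorem get_rest_sum_of_list_spec : Claim_equal_get_rest_sum_of_list := by
  intro ns depth _
  unfold Spec_get_rest_sum_of_list
  exact main_eq ns depth
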